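-- pv_equiv track=rewrite | github.com/lloydhasley/BendixG15 | python/g15d/G15Ptr.py | pti_remove_comments
-- ===== SOURCE A (Python) =====
-- def pti_remove_comments(image):
--     newimage = []
--     eat = 0
--     for c in image:
--         # if c == '#':
--         if c == 0x23:
--             eat = 1
--         #elif c == '\n':
--         elif c == 0x0a:
--             eat = 0
--         if not eat:
--             newimage.append(c)
--     return newimage
-- ===== SOURCE B (Python) =====
-- def pti_remove_comments(image):
--     # split into newline-separated segments, truncate each at the first '#',
--     # then rejoin with newlines
--     segments = []
--     cur = []
--     for c in image:
--         if c == 0x0a: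
--             segments.append(cur)
--             cur = []
--         else:
--             cur.append(c)
--     segments.append(cur)
--     out = []
--     first = True
--     for seg in segments:
--         if not first:
--             out.append(0x0a)
--         first = False
--         for c in seg:
--             if c == 0x23:
--                 break
--             out.append(c)
--     return out
-- ===== Notes on version B (the rewrite author's own statement) =====
-- stated objective: alternative
-- what changed: Replaced the eat-flag state machine with a split-on-newline / truncate-each-segment-at-first-'#' / rejoin-with-newlines decomposition.
import Mathlib
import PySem

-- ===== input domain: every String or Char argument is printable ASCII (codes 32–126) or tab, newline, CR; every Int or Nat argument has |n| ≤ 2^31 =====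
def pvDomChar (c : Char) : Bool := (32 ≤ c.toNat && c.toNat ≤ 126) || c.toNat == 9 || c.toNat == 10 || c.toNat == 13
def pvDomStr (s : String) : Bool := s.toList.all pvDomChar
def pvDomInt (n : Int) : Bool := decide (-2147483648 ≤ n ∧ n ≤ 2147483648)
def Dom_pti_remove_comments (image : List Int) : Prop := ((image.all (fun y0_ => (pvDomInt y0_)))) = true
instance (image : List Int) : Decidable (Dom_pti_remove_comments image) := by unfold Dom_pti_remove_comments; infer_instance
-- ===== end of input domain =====

-- B replaces A's eat-flag state machine by split-on-newline / truncate-at-'#' / rejoin (alternative decomposition, same cost).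


-- ===== PORT A =====
-- A's loop: newimage/eat accumulator, one pass
def pti_remove_comments (image : List Int) : List Int :=
  (image.foldl (fun (st : List Int × Int) c =>
      let eat := if c = 0x23 then 1 else if c = 0x0a then 0 else st.2
      if eat = 0 then (st.1 ++ [c], eat) else (st.1, eat))
    ([], 0)).1

-- ===== PORT B =====
-- split into newline-separated segments (Source B's first loop builds them front to back)
def pvSegs : List Int → List (List Int)
  | [] => [[]]
  | c :: rest =>
    if c = 0x0a then [] :: pvSegs rest
    else
      match pvSegs rest with
      | s :: ss => (c :: s) :: ss
      | [] => [[c]]   -- unreachable: pvSegs never returns []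

-- Source B's inner loop: keep bytes up to (not including) the first '#'
def pvTrunc : List Int → List Int
  | [] => []
  | c :: rest => if c = 0x23 then [] else c :: pvTrunc rest

-- Source B's second loop: join the truncated segments with a single newline
def pvJoin : List (List Int) → List Int
  | [] => []
  | [s] => s
  | s :: ss => s ++ 0x0a :: pvJoin ss

def pti_remove_comments_alt (image : List Int) : List Int :=
  pvJoin ((pvSegs image).map pvTrunc)

-- ===== PRECONDITION & SPEC =====
def Spec_pti_remove_comments (image : List Int) (out : List Int) : Prop := out = pti_remove_comments_alt image
instance (image : List Int) (out : List Int) : Decidable (Spec_pti_remove_comments image out) := by unfold Spec_pti_remove_comments; infer_instance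

-- ===== CLAIM (what is proved, stated in full; the proofs are below) =====
def Claim_equal_pti_remove_comments : Prop := ∀ (image : List Int), Dom_pti_remove_comments image → Spec_pti_remove_comments image (pti_remove_comments image)

-- ===== LEMMAS AND PROOFS =====

-- A's loop rewritten as structural recursion (proof helper)
def pvGoA (eat : Int) : List Int → List Int
  | [] => []
  | c :: rest =>
    let eat' := if c = 0x23 then 1 else if c = 0x0a then 0 else eat
    if eat' = 0 then c :: pvGoA eat' rest else pvGoA eat' rest

lemma pvFoldA (l : List Int) : ∀ (acc : List Int) (eat : Int),
    (l.foldl (fun (st : List Int × Int) c =>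
      let eat := if c = 0x23 then 1 else if c = 0x0a then 0 else st.2
      if eat = 0 then (st.1 ++ [c], eat) else (st.1, eat)) (acc, eat)).1
    = acc ++ pvGoA eat l := by
  induction l with
  | nil => intro acc eat; simp [pvGoA]
  | cons c rest ih =>
    intro acc eat
    simp only [List.foldl_cons, pvGoA]
    by_cases h23 : c = 0x23
    · simp [h23, ih]
    · by_cases h0a : c = 0x0a
      · simp [h0a, ih]
      · by_cases he : eat = 0
        · simp [h23, h0a, he, ih]
        · simp [h23, h0a, he, ih]

lemma pvSegs_ne_nil (l : List Int) : pvSegs l ≠ [] := by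
  cases l with
  | nil => simp [pvSegs]
  | cons c rest =>
    simp only [pvSegs]
    split
    · simp
    · rcases h : pvSegs rest with _ | ⟨s, ss⟩ <;> simp

lemma pvJoin_cons_head (a : Int) (s : List Int) (ss : List (List Int)) :
    pvJoin ((a :: s) :: ss) = a :: pvJoin (s :: ss) := by
  cases ss <;> simp [pvJoin]

lemma pvGoA_eq (l : List Int) :
    pvGoA 0 l = pvJoin ((pvSegs l).map pvTrunc) ∧
    pvGoA 1 l = (match pvSegs l with
                 | [] => []
                 | [_] => []
                 | _ :: ss => 0x0a :: pvJoin (ss.map pvTrunc)) := by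
  induction l with
  | nil => exact ⟨rfl, rfl⟩
  | cons c rest ih =>
    obtain ⟨ih0, ih1⟩ := ih
    rcases hs : pvSegs rest with _ | ⟨s, ss⟩
    · exact absurd hs (pvSegs_ne_nil rest)
    by_cases h23 : c = 0x23
    · -- c = '#': eat becomes 1, byte dropped; head segment truncates to []
      have hseg : pvSegs (c :: rest) = (c :: s) :: ss := by
        simp [pvSegs, h23, hs]
      have htr : pvTrunc (c :: s) = [] := by simp [pvTrunc, h23]
      have hgo : pvGoA 0 (c :: rest) = pvGoA 1 rest ∧
                 pvGoA 1 (c :: rest) = pvGoA 1 rest := by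
        constructor <;> simp [pvGoA, h23]
      rw [hgo.1, hgo.2, ih1, hs, hseg]
      cases ss <;> simp [pvJoin, htr]
    · by_cases h0a : c = 0x0a
      · -- newline: eat resets, newline kept; new empty head segment
        have hseg : pvSegs (c :: rest) = [] :: pvSegs rest := by
          simp [pvSegs, h0a]
        have hgo : pvGoA 0 (c :: rest) = c :: pvGoA 0 rest ∧
                   pvGoA 1 (c :: rest) = c :: pvGoA 0 rest := by
          constructor <;> simp [pvGoA, h0a]
        rw [hgo.1, hgo.2, ih0, hseg, h0a]
        have : pvJoin (List.map pvTrunc ([] :: pvSegs rest))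
             = (10:Int) :: pvJoin (List.map pvTrunc (pvSegs rest)) := by
          rw [hs]; simp [pvJoin, pvTrunc]
        rw [this]
        exact ⟨rfl, by rw [hs]⟩
      · -- ordinary byte: kept iff not eating; prepends to head segment
        have hseg : pvSegs (c :: rest) = (c :: s) :: ss := by
          simp [pvSegs, h0a, hs]
        have htr : pvTrunc (c :: s) = c :: pvTrunc s := by simp [pvTrunc, h23]
        have hgo : pvGoA 0 (c :: rest) = c :: pvGoA 0 rest ∧
                   pvGoA 1 (c :: rest) = pvGoA 1 rest := by
          constructor <;> simp [pvGoA, h23, h0a]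
        rw [hgo.1, hgo.2, ih0, ih1, hs, hseg]
        constructor
        · simp only [List.map, htr]
          rw [pvJoin_cons_head]
        · cases ss <;> rfl

-- ===== VERDICT (by name: the statement is the Claim_ definition above) =====
theorem pti_remove_comments_spec : Claim_equal_pti_remove_comments := by
  intro image _
  unfold Spec_pti_remove_comments pti_remove_comments pti_remove_comments_alt
  rw [pvFoldA]
  simpa using (pvGoA_eq image).1
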